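-- pv_equiv track=rewrite | github.com/math-s/knowledge-graph | pipeline/src/scraper_patristic.py | discover_author_works
-- ===== SOURCE A (Python) =====
-- def discover_author_works(author_display: str, fathers_index: dict[str, list[str]]) -> list[str]:
--     """Find work URLs for an author from the fathers index.
--
--     Handles name variations: "Ambrose" matches "Ambrose (340-397)",
--     "John Chrysostom" matches "John Chrysostom (347-407)", etc.
--     """
--     display_lower = author_display.lower()
--     # Try exact match
--     if author_display in fathers_index:
--         return fathers_index[author_display]
--     # Try: index name starts with our display name (handles "(date)" suffixes)
--     for name, urls in fathers_index.items():
--         name_lower = name.lower()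
--         if name_lower.startswith(display_lower) or display_lower.startswith(name_lower.split("(")[0].strip()):
--             return urls
--     # Try: any significant overlap
--     for name, urls in fathers_index.items():
--         # Compare key words
--         display_words = set(display_lower.split())
--         name_words = set(name.lower().replace("(", "").replace(")", "").split())
--         if len(display_words & name_words) >= 2 or (len(display_words) == 1 and display_words <= name_words):
--             return urls
--     return []
-- ===== SOURCE B (Python) =====
-- def discover_author_works(author_display: str, fathers_index: dict[str, list[str]]) -> list[str]:
--     """Single classifying pass: rank each entry (0 exact, 1 prefix, 2 word-overlap),
--     keeping the first entry achieving the lowest rank seen.  Ranks are computed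
--     lazily: rank_below(name, bound) only decides whether the entry beats the
--     current best rank, so once a rank-1 entry is held only exact matches are tested."""
--     display_lower = author_display.lower()
--
--     def rank_below(name: str, bound: int) -> int:
--         # the rank of `name` if it is < bound, else bound
--         if name == author_display:
--             return 0
--         if bound <= 1:
--             return bound
--         name_lower = name.lower()
--         if name_lower.startswith(display_lower) or display_lower.startswith(name_lower.split("(")[0].strip()):
--             return 1
--         if bound <= 2:
--             return bound
--         display_words = set(display_lower.split())
--         name_words = set(name_lower.replace("(", "").replace(")", "").split())
--         if len(display_words & name_words) >= 2 or (len(display_words) == 1 and display_words <= name_words):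
--             return 2
--         return bound
--
--     best_rank, best_urls = 3, []
--     for name, urls in fathers_index.items():
--         r = rank_below(name, best_rank)
--         if r < best_rank:
--             best_rank, best_urls = r, urls
--             if r == 0:
--                 break
--     return best_urls
-- ===== Notes on version B (the rewrite author's own statement) =====
-- stated objective: alternative
-- what changed: Replaced A's three sequential scans (exact dict lookup, then a prefix pass, then a word-overlap pass) by a single pass that ranks each entry (0 exact / 1 prefix / 2 overlap) and keeps the first entry achieving the lowest rank seen, breaking early on an exact hit.
import Mathlib
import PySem

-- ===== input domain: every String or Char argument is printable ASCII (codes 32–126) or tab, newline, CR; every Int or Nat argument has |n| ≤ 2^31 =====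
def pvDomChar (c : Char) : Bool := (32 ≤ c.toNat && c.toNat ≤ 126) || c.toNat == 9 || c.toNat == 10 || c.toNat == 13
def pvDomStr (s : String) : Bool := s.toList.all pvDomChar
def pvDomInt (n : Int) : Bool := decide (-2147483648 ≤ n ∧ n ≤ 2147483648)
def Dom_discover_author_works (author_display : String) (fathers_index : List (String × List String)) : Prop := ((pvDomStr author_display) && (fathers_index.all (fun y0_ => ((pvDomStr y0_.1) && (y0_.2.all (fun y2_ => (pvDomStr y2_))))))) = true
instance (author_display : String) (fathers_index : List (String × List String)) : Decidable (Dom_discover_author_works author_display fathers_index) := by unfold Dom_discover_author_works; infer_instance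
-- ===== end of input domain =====

-- B replaces A's three sequential scans by a single classifying pass (rank 0 exact / 1 prefix / 2 overlap,
-- keeping the first entry of the best rank seen); objective: alternative decomposition, same cost.

-- ===== PORT A =====
-- A's phase-2 predicate: name_lower.startswith(display_lower) or display_lower.startswith(name_lower.split("(")[0].strip())
def dawPhase1 (display_lower name : String) : Bool :=
  let name_lower := PySem.Str.lower name
  PySem.Str.startswith name_lower display_lower ||
    PySem.Str.startswith display_lower (PySem.Str.strip (((PySem.Str.split? name_lower "(").getD []).headD ""))

-- A's phase-3 word-overlap predicate
def dawPhase2 (display_lower name : String) : Bool :=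
  let display_words : PySem.Set String := PySem.Set.ofList (PySem.Str.split₀ display_lower)
  let name_words : PySem.Set String :=
    PySem.Set.ofList (PySem.Str.split₀ (PySem.Str.replace (PySem.Str.replace (PySem.Str.lower name) "(" "") ")" ""))
  decide (2 ≤ (PySem.Set.inter display_words name_words).length) ||
    ((display_words.length == 1) && PySem.Set.issubset display_words name_words)

def discover_author_works (author_display : String) (fathers_index : List (String × List String)) : List String :=
  let display_lower := PySem.Str.lower author_display
  -- exact dict lookup: first key equal to author_display
  match fathers_index.find? (fun p => p.1 == author_display) with
  | some p => p.2
  | none =>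
    match fathers_index.find? (fun p => dawPhase1 display_lower p.1) with
    | some p => p.2
    | none =>
      match fathers_index.find? (fun p => dawPhase2 display_lower p.1) with
      | some p => p.2
      | none => []

-- ===== PORT B =====
-- Source B's rank_below(name, bound): the rank of name (0 exact, 1 prefix, 2 overlap) if < bound, else bound
def dawRankBelow (author_display display_lower name : String) (bound : Nat) : Nat :=
  if name == author_display then 0
  else if bound ≤ 1 then bound
  else
    let name_lower := PySem.Str.lower name
    if PySem.Str.startswith name_lower display_lower ||
        PySem.Str.startswith display_lower (PySem.Str.strip (((PySem.Str.split? name_lower "(").getD []).headD "")) then 1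
    else if bound ≤ 2 then bound
    else
      let display_words : PySem.Set String := PySem.Set.ofList (PySem.Str.split₀ display_lower)
      let name_words : PySem.Set String :=
        PySem.Set.ofList (PySem.Str.split₀ (PySem.Str.replace (PySem.Str.replace name_lower "(" "") ")" ""))
      if decide (2 ≤ (PySem.Set.inter display_words name_words).length) ||
          ((display_words.length == 1) && PySem.Set.issubset display_words name_words) then 2
      else bound

-- Source B's loop: best_rank/best_urls accumulator, early break on rank 0
def dawLoop (author_display display_lower : String) :
    List (String × List String) → Nat → List String → Nat × List String
  | [], best_rank, best_urls => (best_rank, best_urls)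
  | (name, urls) :: rest, best_rank, best_urls =>
    let r := dawRankBelow author_display display_lower name best_rank
    if r < best_rank then
      if r == 0 then (r, urls)
      else dawLoop author_display display_lower rest r urls
    else dawLoop author_display display_lower rest best_rank best_urls

def discover_author_works_alt (author_display : String) (fathers_index : List (String × List String)) : List String :=
  let display_lower := PySem.Str.lower author_display
  (dawLoop author_display display_lower fathers_index 3 []).2

-- ===== PRECONDITION & SPEC =====
def Spec_discover_author_works (author_display : String) (fathers_index : List (String × List String)) (out : List String) : Prop := out = discover_author_works_alt author_display fathers_index
instance (author_display : String) (fathers_index : List (String × List String)) (out : List String) : Decidable (Spec_discover_author_works author_display fathers_index out) := by unfold Spec_discover_author_works; infer_instance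

-- ===== CLAIM (what is proved, stated in full; the proofs are below) =====
def Claim_equal_discover_author_works : Prop := ∀ (author_display : String) (fathers_index : List (String × List String)), Dom_discover_author_works author_display fathers_index → Spec_discover_author_works author_display fathers_index (discover_author_works author_display fathers_index)

-- ===== LEMMAS AND PROOFS =====

-- rank_below expressed through A's phase predicates (the branch conditions are token-identical)
theorem dawRankBelow_eq (ad dl n : String) (b : Nat) :
    dawRankBelow ad dl n b =
      if n == ad then 0 else if b ≤ 1 then b else if dawPhase1 dl n then 1
      else if b ≤ 2 then b else if dawPhase2 dl n then 2 else b := rfl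

def dawChain (o : Option (String × List String)) (bu : List String) : List String :=
  match o with
  | some p => p.2
  | none => bu

theorem dawLoop_one (ad dl : String) (l : List (String × List String)) :
    ∀ bu, (dawLoop ad dl l 1 bu).2 = dawChain (l.find? (fun p => p.1 == ad)) bu := by
  induction l with
  | nil => intro bu; rfl
  | cons h t ih =>
    intro bu
    obtain ⟨n, u⟩ := h
    rw [dawLoop]
    simp only [dawRankBelow_eq]
    cases h0 : (n == ad) with
    | true => simp [h0, dawChain]
    | false => simp [h0, ih]

theorem dawLoop_two (ad dl : String) (l : List (String × List String)) :
    ∀ bu, (dawLoop ad dl l 2 bu).2 =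
      dawChain (l.find? (fun p => p.1 == ad))
        (dawChain (l.find? (fun p => dawPhase1 dl p.1)) bu) := by
  induction l with
  | nil => intro bu; rfl
  | cons h t ih =>
    intro bu
    obtain ⟨n, u⟩ := h
    rw [dawLoop]
    simp only [dawRankBelow_eq]
    cases h0 : (n == ad) with
    | true => simp [h0, dawChain]
    | false =>
      cases h1 : dawPhase1 dl n with
      | true => simp [h0, h1, dawLoop_one, dawChain]
      | false => simp [h0, h1, ih]

theorem dawLoop_three (ad dl : String) (l : List (String × List String)) :
    ∀ bu, (dawLoop ad dl l 3 bu).2 =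
      dawChain (l.find? (fun p => p.1 == ad))
        (dawChain (l.find? (fun p => dawPhase1 dl p.1))
          (dawChain (l.find? (fun p => dawPhase2 dl p.1)) bu)) := by
  induction l with
  | nil => intro bu; rfl
  | cons h t ih =>
    intro bu
    obtain ⟨n, u⟩ := h
    rw [dawLoop]
    simp only [dawRankBelow_eq]
    cases h0 : (n == ad) with
    | true => simp [h0, dawChain]
    | false =>
      cases h1 : dawPhase1 dl n with
      | true => simp [h0, h1, dawLoop_one, dawChain]
      | false =>
        cases h2 : dawPhase2 dl n with
        | true => simp [h0, h1, h2, dawLoop_two, dawChain]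
        | false => simp [h0, h1, h2, ih]

-- ===== VERDICT (by name: the statement is the Claim_ definition above) =====
theorem discover_author_works_spec : Claim_equal_discover_author_works := by
  intro ad fi _
  unfold Spec_discover_author_works discover_author_works discover_author_works_alt
  rw [dawLoop_three]
  rcases h0 : List.find? (fun p => p.1 == ad) fi with _ | p
  · rcases h1 : List.find? (fun p => dawPhase1 (PySem.Str.lower ad) p.1) fi with _ | p
    · rcases h2 : List.find? (fun p => dawPhase2 (PySem.Str.lower ad) p.1) fi with _ | p
      · simp [h0, h1, h2, dawChain]
      · simp [h0, h1, h2, dawChain]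
    · simp [h0, h1, dawChain]
  · simp [h0, dawChain]
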